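-- pv_equiv track=rewrite | github.com/cambridge-cares/TheWorldAvatar | ontology-tools/CMCLABoxManagement/chemaboxwriters/chemaboxwriters/common/utilsfunc.py | get_atom_indices_from_qc_json
-- ===== SOURCE A (Python) =====
-- from typing import List, Optional, Dict, Literal, Tuple
--
-- def get_atom_indices_from_qc_json(atom_list: List):
--     atom_counters = {}
--     atom_ind = []
--     for atom_type in atom_list:
--         if atom_type not in atom_counters:
--             atom_counters[atom_type] = 1
--         atom_ind.append(atom_counters[atom_type])
--         atom_counters[atom_type] += 1
--     return atom_ind
-- ===== SOURCE B (Python) =====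
-- def get_atom_indices_from_qc_json(atom_list):
--     positions = {}
--     for i, atom in enumerate(atom_list):
--         positions.setdefault(atom, []).append(i)
--     atom_ind = [0] * len(atom_list)
--     for idxs in positions.values():
--         for rank, i in enumerate(idxs, 1):
--             atom_ind[i] = rank
--     return atom_ind
-- ===== Notes on version B (the rewrite author's own statement) =====
-- stated objective: alternative
-- what changed: Instead of one pass keeping a dict of running per-type counters and appending each counter, B first groups the positions of each atom type into a dict of index lists and then scatters per-group ranks (1,2,...) into a preallocated output array.
import Mathlib
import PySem

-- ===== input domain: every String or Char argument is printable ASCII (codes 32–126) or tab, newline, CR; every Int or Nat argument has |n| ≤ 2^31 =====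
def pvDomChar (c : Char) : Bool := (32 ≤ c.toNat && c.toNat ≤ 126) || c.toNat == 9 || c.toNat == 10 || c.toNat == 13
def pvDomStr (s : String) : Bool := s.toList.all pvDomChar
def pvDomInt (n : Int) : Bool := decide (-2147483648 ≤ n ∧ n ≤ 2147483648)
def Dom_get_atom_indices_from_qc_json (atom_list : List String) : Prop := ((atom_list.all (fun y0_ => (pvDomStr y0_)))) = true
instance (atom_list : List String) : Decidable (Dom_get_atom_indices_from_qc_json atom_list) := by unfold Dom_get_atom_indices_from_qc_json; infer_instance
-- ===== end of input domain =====

-- B replaces A's single pass with a dict of running per-type counters by a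
-- group-then-scatter decomposition: group each type's positions, then write
-- per-group ranks into a preallocated output list (same result, different algorithm).

-- ===== PORT A =====
-- one loop iteration of A: 'if atom_type not in atom_counters: atom_counters[atom_type] = 1;
-- atom_ind.append(atom_counters[atom_type]); atom_counters[atom_type] += 1'
def pvStepA (st : PySem.Dict String Int × List Int) (atom_type : String) :
    PySem.Dict String Int × List Int :=
  let counters := if st.1.contains atom_type = false then st.1.insert atom_type 1 else st.1
  let v := counters.getD atom_type 0   -- key is present here, so the default is never read
  (counters.insert atom_type (v + 1), st.2 ++ [v])

def get_atom_indices_from_qc_json (atom_list : List String) : List Int :=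
  (atom_list.foldl pvStepA (PySem.Dict.empty, [])).2

-- ===== PORT B =====
-- phase 1 of Source B: 'for i, atom in enumerate(atom_list): positions.setdefault(atom, []).append(i)'
-- (setdefault-then-append-in-place is dict.modify with default [])
def pvGroups (l : List String) : PySem.Dict String (List Int) :=
  (PySem.List.enumerate l).foldl (fun d q => d.modify q.2 [] (fun v => v ++ [q.1])) PySem.Dict.empty

-- inner loop of phase 2: 'for rank, i in enumerate(idxs, 1): atom_ind[i] = rank'
def pvScatter (out : List Int) (idxs : List Int) : List Int :=
  (PySem.List.enumerate idxs 1).foldl (fun o q => PySem.List.pySetD o q.2 q.1) out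

def get_atom_indices_from_qc_json_alt (atom_list : List String) : List Int :=
  ((pvGroups atom_list).values).foldl pvScatter (List.replicate atom_list.length 0)

-- ===== PRECONDITION & SPEC =====
def Spec_get_atom_indices_from_qc_json (atom_list : List String) (out : List Int) : Prop := out = get_atom_indices_from_qc_json_alt atom_list
instance (atom_list : List String) (out : List Int) : Decidable (Spec_get_atom_indices_from_qc_json atom_list out) := by unfold Spec_get_atom_indices_from_qc_json; infer_instance

-- ===== CLAIM (what is proved, stated in full; the proofs are below) =====
def Claim_equal_get_atom_indices_from_qc_json : Prop := ∀ (atom_list : List String), Dom_get_atom_indices_from_qc_json atom_list → Spec_get_atom_indices_from_qc_json atom_list (get_atom_indices_from_qc_json atom_list)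

-- ===== LEMMAS AND PROOFS =====

-- common reference: per-position index relative to an already-seen prefix p
def pvSpec (p l : List String) : List Int :=
  match l with
  | [] => []
  | a :: t => ((p.count a : Int) + 1) :: pvSpec (p ++ [a]) t

lemma pvSpec_length (l : List String) : ∀ p : List String, (pvSpec p l).length = l.length := by
  induction l with
  | nil => intro p; simp [pvSpec]
  | cons a t ih => intro p; simp [pvSpec, ih]

lemma pvSpec_getElem? (l : List String) : ∀ (p : List String) (i : Nat) (hi : i < l.length),
    (pvSpec p l)[i]? = some (((p ++ l.take i).count l[i] : Int) + 1) := by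
  induction l with
  | nil => intro p i hi; simp at hi
  | cons a t ih =>
    intro p i hi
    match i with
    | 0 => simp [pvSpec]
    | Nat.succ j =>
      have hj : j < t.length := by simpa using hi
      simp only [pvSpec, List.getElem?_cons_succ, List.getElem_cons_succ, List.take_succ_cons]
      rw [ih (p ++ [a]) j hj]
      simp [List.append_assoc]

-- loop invariant of A: the counter dict stores (count so far) + 1 for seen keys
def pvInv (p : List String) (d : PySem.Dict String Int) : Prop :=
  ∀ x, d.get? x = if p.count x = 0 then none else some ((p.count x : Int) + 1)

lemma pvInv_empty : pvInv [] PySem.Dict.empty := by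
  intro x; simp [PySem.Dict.get?_empty]

lemma pvInv_step (p : List String) (d : PySem.Dict String Int) (a : String)
    (h : pvInv p d) :
    pvInv (p ++ [a]) ((pvStepA (d, acc) a).1) ∧ (pvStepA (d, acc) a).2 = acc ++ [(p.count a : Int) + 1] := by
  have hc : d.contains a = (decide (¬ p.count a = 0)) := by
    rw [PySem.Dict.contains_eq_isSome_get?, h a]
    by_cases hz : p.count a = 0 <;> simp [hz]
  by_cases hz : p.count a = 0
  · -- a unseen: branch inserts 1
    have hcf : d.contains a = false := by simp [hc, hz]
    constructor
    · intro x
      simp only [pvStepA, hcf]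
      by_cases hx : x = a
      · subst hx
        simp [PySem.Dict.insert_insert_self, PySem.Dict.getD_insert_self,
          PySem.Dict.get?_insert_self, List.count_append, hz]
      · have hax : ¬ a = x := fun e => hx e.symm
        rw [PySem.Dict.get?_insert_of_ne _ _ hx, if_pos trivial,
          PySem.Dict.get?_insert_of_ne _ _ hx, h x]
        simp [List.count_append, hax]
    · simp [pvStepA, hcf, PySem.Dict.getD_insert_self, hz]
  · -- a seen before: counter present
    have hct : d.contains a = true := by simp [hc, hz]
    have hg : d.getD a 0 = (p.count a : Int) + 1 := by
      rw [PySem.Dict.getD_eq_get?_getD, h a]; simp [hz]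
    constructor
    · intro x
      simp only [pvStepA, hct]
      by_cases hx : x = a
      · subst hx
        simp [PySem.Dict.get?_insert_self, hg, List.count_append, hz]
      · have hax : ¬ a = x := fun e => hx e.symm
        simp [PySem.Dict.get?_insert_of_ne _ _ hx, h x, List.count_append, hax]
    · simp [pvStepA, hct, hg]

lemma pvLoopA (l : List String) : ∀ (p : List String) (d : PySem.Dict String Int)
    (acc : List Int), pvInv p d → (l.foldl pvStepA (d, acc)).2 = acc ++ pvSpec p l := by
  induction l with
  | nil => intro p d acc _; simp [pvSpec]
  | cons a t ih =>
    intro p d acc h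
    obtain ⟨h1, h2⟩ := pvInv_step (acc := acc) p d a h
    simp only [List.foldl_cons]
    have : t.foldl pvStepA (pvStepA (d, acc) a) =
        t.foldl pvStepA ((pvStepA (d, acc) a).1, (pvStepA (d, acc) a).2) := by simp
    rw [this, ih (p ++ [a]) _ _ h1, h2, pvSpec]
    simp

-- B side ---------------------------------------------------------------

-- positions of atom x in l, starting at offset s
def pvPosFrom (l : List String) (s : Int) (x : String) : List Int :=
  (((PySem.List.enumerate l s).map Prod.swap).filter (fun p => p.1 == x)).map (·.2)

lemma pvPosFrom_cons (a : String) (t : List String) (s : Int) (x : String) :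
    pvPosFrom (a :: t) s x = (if a = x then [s] else []) ++ pvPosFrom t (s + 1) x := by
  by_cases h : a = x <;>
    simp [pvPosFrom, PySem.List.enumerate_cons, h]

lemma pvPosFrom_mem (l : List String) : ∀ (s : Int) (x : String) (j : Int),
    j ∈ pvPosFrom l s x → s ≤ j ∧ j < s + l.length := by
  induction l with
  | nil => intro s x j hj; simp [pvPosFrom, PySem.List.enumerate_nil] at hj
  | cons a t ih =>
    intro s x j hj
    rw [pvPosFrom_cons] at hj
    simp only [List.length_cons]
    rcases List.mem_append.mp hj with h1 | h2
    · have hjs : j = s := by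
        by_cases h : a = x
        · rw [if_pos h] at h1; simpa using h1
        · rw [if_neg h] at h1; simp at h1
      subst hjs
      constructor
      · exact le_refl _
      · push_cast; omega
    · have := ih (s + 1) x j h2
      constructor
      · omega
      · push_cast; omega

lemma pvPosFrom_pairwise (l : List String) : ∀ (s : Int) (x : String),
    (pvPosFrom l s x).Pairwise (· < ·) := by
  induction l with
  | nil => intro s x; simp [pvPosFrom, PySem.List.enumerate_nil]
  | cons a t ih =>
    intro s x
    rw [pvPosFrom_cons]
    by_cases h : a = x
    · rw [if_pos h, List.singleton_append, List.pairwise_cons]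
      refine ⟨fun j hj => ?_, ih (s + 1) x⟩
      have := pvPosFrom_mem t (s + 1) x j hj
      omega
    · rw [if_neg h, List.nil_append]
      exact ih (s + 1) x

lemma pvPosFrom_mem_iff (l : List String) : ∀ (s : Int) (x : String) (i : Nat)
    (hi : i < l.length), ((s + (i : Int)) ∈ pvPosFrom l s x ↔ l[i] = x) := by
  induction l with
  | nil => intro s x i hi; simp at hi
  | cons a t ih =>
    intro s x i hi
    rw [pvPosFrom_cons]
    match i with
    | 0 =>
      simp only [Nat.cast_zero, add_zero, List.mem_append, List.getElem_cons_zero]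
      constructor
      · rintro (h1 | h2)
        · by_cases h : a = x
          · exact h
          · rw [if_neg h] at h1; simp at h1
        · have := pvPosFrom_mem t (s + 1) x s h2; omega
      · intro h; left; rw [if_pos h]; simp
    | Nat.succ j =>
      have hj : j < t.length := by simpa using hi
      have harith : s + ((j + 1 : Nat) : Int) = (s + 1) + (j : Int) := by push_cast; ring
      rw [harith]
      simp only [List.mem_append, List.getElem_cons_succ]
      constructor
      · rintro (h1 | h2)
        · exfalso
          have : (s + 1) + (j : Int) = s := by
            by_cases h : a = x
            · rw [if_pos h] at h1; simpa using h1
            · rw [if_neg h] at h1; simp at h1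
          omega
        · exact (ih (s + 1) x j hj).mp h2
      · intro h; right; exact (ih (s + 1) x j hj).mpr h

lemma pvPosFrom_idxOf (l : List String) : ∀ (s : Int) (x : String) (i : Nat)
    (hi : i < l.length), l[i] = x →
    (pvPosFrom l s x).idxOf (s + (i : Int)) = (l.take i).count x := by
  induction l with
  | nil => intro s x i hi; simp at hi
  | cons a t ih =>
    intro s x i hi hx
    rw [pvPosFrom_cons]
    match i with
    | 0 =>
      simp only [List.getElem_cons_zero] at hx
      rw [if_pos hx]
      simp
    | Nat.succ j =>
      have hj : j < t.length := by simpa using hi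
      have hx' : t[j] = x := by simpa using hx
      have harith : s + ((j + 1 : Nat) : Int) = (s + 1) + (j : Int) := by push_cast; ring
      rw [harith]
      by_cases h : a = x
      · rw [if_pos h, List.singleton_append, List.take_succ_cons, List.count_cons,
          List.idxOf_cons]
        have hne : (s == s + 1 + (j : Int)) = false := by
          simp only [beq_eq_false_iff_ne, ne_eq]
          omega
        rw [hne]
        simp only [cond_false]
        rw [ih (s + 1) x j hj hx']
        simp [h]
      · rw [if_neg h, List.nil_append, List.take_succ_cons, List.count_cons]
        rw [ih (s + 1) x j hj hx']
        have : (a == x) = false := by simpa using h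
        simp [this]

lemma pvScatter_length (idxs : List Int) : ∀ (s : Int) (out : List Int),
    ((PySem.List.enumerate idxs s).foldl (fun o q => PySem.List.pySetD o q.2 q.1) out).length
      = out.length := by
  induction idxs with
  | nil => intro s out; simp [PySem.List.enumerate_nil]
  | cons j t ih =>
    intro s out
    rw [PySem.List.enumerate_cons, List.foldl_cons, ih]
    simp [PySem.List.length_pySetD]

lemma pvScatter_getElem? (idxs : List Int) : ∀ (s : Int) (out : List Int),
    idxs.Pairwise (· < ·) → (∀ j ∈ idxs, 0 ≤ j) → ∀ (i : Nat),
    ((PySem.List.enumerate idxs s).foldl (fun o q => PySem.List.pySetD o q.2 q.1) out)[i]? =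
      if (i : Int) ∈ idxs then
        (if i < out.length then some (s + (idxs.idxOf (i : Int) : Int)) else none)
      else out[i]? := by
  induction idxs with
  | nil => intro s out _ _ i; simp [PySem.List.enumerate_nil]
  | cons j t ih =>
    intro s out hp hnn i
    have hjt : ∀ y ∈ t, j < y := (List.pairwise_cons.mp hp).1
    have hj0 : 0 ≤ j := hnn j (List.mem_cons_self)
    rw [PySem.List.enumerate_cons, List.foldl_cons]
    have hset : PySem.List.pySetD out j s = out.set j.toNat s :=
      PySem.List.pySetD_of_nonneg out s hj0
    rw [ih (s + 1) _ (List.pairwise_cons.mp hp).2 (fun y hy => hnn y (List.mem_cons_of_mem _ hy))]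
    by_cases hit : (i : Int) ∈ t
    · have hji : j < (i : Int) := hjt _ hit
      have hne : (i : Int) ≠ j := by omega
      rw [if_pos hit, if_pos (List.mem_cons_of_mem _ hit)]
      rw [hset]
      simp only [List.length_set]
      by_cases hlen : i < out.length
      · rw [if_pos hlen, if_pos hlen, List.idxOf_cons]
        have hb : (j == (i : Int)) = false := by
          simp only [beq_eq_false_iff_ne, ne_eq]
          omega
        rw [hb]
        simp only [cond_false]
        congr 1
        push_cast
        ring
      · rw [if_neg hlen, if_neg hlen]
    · rw [if_neg hit, hset]
      by_cases hij : (i : Int) = j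
      · have hi : i = j.toNat := by omega
        rw [if_pos (by simp [List.mem_cons, hij])]
        rw [List.getElem?_set]
        have hidx : List.idxOf (i : Int) (j :: t) = 0 := by simp [hij]
        rw [hidx]
        simp only [hi]
        by_cases hlen : j.toNat < out.length
        · simp [hlen]
        · simp [hlen]
      · rw [if_neg (by simp [hij, hit])]
        rw [List.getElem?_set]
        have hne2 : j.toNat ≠ i := by omega
        simp [hne2]

lemma pvGroups_getD (l : List String) (x : String) :
    (pvGroups l).getD x [] = pvPosFrom l 0 x := by
  have h : pvGroups l = ((PySem.List.enumerate l).map Prod.swap).foldl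
      (fun d p => d.modify p.1 [] (· ++ [p.2])) PySem.Dict.empty := by
    rw [List.foldl_map]
    simp [pvGroups]
  rw [h, PySem.Dict.getD_foldl_modify_append, PySem.Dict.getD_empty]
  simp [pvPosFrom]

lemma pvGroups_keys (l : List String) : (pvGroups l).keys = PySem.Set.ofList l := by
  rw [pvGroups]
  have h := PySem.Dict.keys_foldl_modify_key (PySem.List.enumerate l)
    (fun q => (q.2 : String)) ([] : List Int) (fun _ q v => v ++ [q.1]) PySem.Dict.empty
  simp only [PySem.Dict.keys_empty, PySem.List.map_snd_enumerate,
    PySem.Set.update_nil_left] at h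
  exact h

lemma pvGroups_nodup_keys (l : List String) : (pvGroups l).keys.Nodup := by
  rw [pvGroups_keys]
  exact PySem.Set.nodup_ofList l

lemma pvOuter_length (l : List String) (ks : List String) : ∀ (out : List Int),
    (ks.foldl (fun o k => pvScatter o (pvPosFrom l 0 k)) out).length = out.length := by
  induction ks with
  | nil => intro out; simp
  | cons k kt ih =>
    intro out
    rw [List.foldl_cons, ih, pvScatter, pvScatter_length]

lemma pvOuter_getElem? (l : List String) (ks : List String) : ∀ (out : List Int) (i : Nat)
    (hi : i < l.length), out.length = l.length →
    (ks.foldl (fun o k => pvScatter o (pvPosFrom l 0 k)) out)[i]? =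
      if l[i] ∈ ks then some (1 + ((l.take i).count l[i] : Int)) else out[i]? := by
  induction ks with
  | nil => intro out i hi hlen; simp
  | cons k kt ih =>
    intro out i hi hlen
    have hlen' : (pvScatter out (pvPosFrom l 0 k)).length = l.length := by
      rw [pvScatter, pvScatter_length, hlen]
    rw [List.foldl_cons, ih (pvScatter out (pvPosFrom l 0 k)) i hi hlen']
    have hsc := pvScatter_getElem? (pvPosFrom l 0 k) 1 out
      (pvPosFrom_pairwise l 0 k) (fun j hj => (pvPosFrom_mem l 0 k j hj).1) i
    by_cases hk : l[i] = k
    · have hmem : ((i : Nat) : Int) ∈ pvPosFrom l 0 k := by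
        have := (pvPosFrom_mem_iff l 0 k i hi).mpr hk
        simpa using this
      have hidx : ((pvPosFrom l 0 k).idxOf ((i : Nat) : Int) : Int) = ((l.take i).count k : Int) := by
        have := pvPosFrom_idxOf l 0 k i hi hk
        simp only [zero_add] at this
        exact_mod_cast this
      have hout' : (pvScatter out (pvPosFrom l 0 k))[i]? =
          some (1 + ((l.take i).count l[i] : Int)) := by
        rw [pvScatter]
        rw [hsc, if_pos hmem, if_pos (by omega), hidx, hk]
      rw [if_pos (show l[i] ∈ k :: kt by simp [hk])]
      by_cases hkt : l[i] ∈ kt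
      · rw [if_pos hkt]
      · rw [if_neg hkt, hout']
    · have hnmem : ((i : Nat) : Int) ∉ pvPosFrom l 0 k := by
        intro hmem
        exact hk ((pvPosFrom_mem_iff l 0 k i hi).mp (by simpa using hmem))
      have hout' : (pvScatter out (pvPosFrom l 0 k))[i]? = out[i]? := by
        rw [pvScatter, hsc, if_neg hnmem]
      rw [hout']
      by_cases hkt : l[i] ∈ kt
      · rw [if_pos hkt, if_pos (List.mem_cons_of_mem _ hkt)]
      · rw [if_neg hkt, if_neg (by simp [List.mem_cons, hk, hkt])]

lemma pvAlt_eq (l : List String) :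
    get_atom_indices_from_qc_json_alt l = pvSpec [] l := by
  rw [get_atom_indices_from_qc_json_alt,
    PySem.Dict.values_eq_map_keys (pvGroups l) (pvGroups_nodup_keys l) [],
    List.foldl_map]
  simp only [pvGroups_getD]
  apply List.ext_getElem?
  intro i
  by_cases hi : i < l.length
  · rw [pvOuter_getElem? l _ _ i hi (by simp)]
    rw [if_pos (by rw [pvGroups_keys]; exact (PySem.Set.mem_ofList _ _).mpr (List.getElem_mem hi))]
    rw [pvSpec_getElem? l [] i hi]
    simp [Int.add_comm]
  · have h1 : ((pvGroups l).keys.foldl (fun o k => pvScatter o (pvPosFrom l 0 k)) (List.replicate l.length 0)).length ≤ i := by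
      rw [pvOuter_length]
      simp
      omega
    have h2 : (pvSpec [] l).length ≤ i := by
      rw [pvSpec_length]
      omega
    rw [List.getElem?_eq_none h1, List.getElem?_eq_none h2]

-- ===== VERDICT (by name: the statement is the Claim_ definition above) =====
theorem get_atom_indices_from_qc_json_spec : Claim_equal_get_atom_indices_from_qc_json := by
  intro atom_list _
  unfold Spec_get_atom_indices_from_qc_json
  rw [get_atom_indices_from_qc_json, pvLoopA atom_list [] _ [] pvInv_empty, pvAlt_eq]
  simp
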